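-- pv_equiv track=rewrite | github.com/joestalker1/leetcode | src/main/scala/contest/237/FindXORSumOfAllPairsBitwiseAND.py | getXORSum
-- ===== SOURCE A (Python) =====
-- def getXORSum(arr1, arr2):
--     xor1 = 0
--     for i in range(len(arr1)):
--         xor1 ^= arr1[i]
--     xor2 = 0
--     for i in range(len(arr2)):
--         xor2 ^= arr2[i]
--     return xor1 & xor2
-- ===== SOURCE B (Python) =====
-- def getXORSum(arr1, arr2):
--     result = 0
--     for x in arr1:
--         for y in arr2:
--             result ^= x & y
--     return result
-- ===== Notes on version B (the rewrite author's own statement) =====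
-- stated objective: alternative
-- what changed: B computes the literal definition -- XOR over all pairwise ANDs with a nested loop -- instead of A's single-pass identity (xor arr1) & (xor arr2); equivalence is the distributivity of AND over XOR.
import Mathlib
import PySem

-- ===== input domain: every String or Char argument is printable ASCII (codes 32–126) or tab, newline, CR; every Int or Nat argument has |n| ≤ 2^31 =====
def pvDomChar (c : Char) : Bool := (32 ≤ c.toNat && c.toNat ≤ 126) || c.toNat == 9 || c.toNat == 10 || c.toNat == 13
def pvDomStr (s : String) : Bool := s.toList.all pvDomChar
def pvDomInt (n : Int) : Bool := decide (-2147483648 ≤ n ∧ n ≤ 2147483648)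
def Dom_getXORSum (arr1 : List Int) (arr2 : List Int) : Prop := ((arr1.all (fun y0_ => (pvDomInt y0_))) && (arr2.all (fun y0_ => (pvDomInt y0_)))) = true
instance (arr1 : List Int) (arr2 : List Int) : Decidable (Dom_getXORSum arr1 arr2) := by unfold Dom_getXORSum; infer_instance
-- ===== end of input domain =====

-- B replaces A's single-pass identity (xor arr1) & (xor arr2) by the literal nested-loop
-- XOR of all pairwise ANDs; the proof is the distributivity of AND over XOR.

-- ===== PORT A =====
def getXORSum (arr1 : List Int) (arr2 : List Int) : Int :=
  let xor1 := arr1.foldl (fun acc a => PySem.Int.bxor acc a) 0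
  let xor2 := arr2.foldl (fun acc a => PySem.Int.bxor acc a) 0
  PySem.Int.band xor1 xor2

-- ===== PORT B =====
def getXORSum_alt (arr1 : List Int) (arr2 : List Int) : Int :=
  arr1.foldl (fun res x => arr2.foldl (fun r y => PySem.Int.bxor r (PySem.Int.band x y)) res) 0

-- ===== PRECONDITION & SPEC =====
def Spec_getXORSum (arr1 : List Int) (arr2 : List Int) (out : Int) : Prop := out = getXORSum_alt arr1 arr2
instance (arr1 : List Int) (arr2 : List Int) (out : Int) : Decidable (Spec_getXORSum arr1 arr2 out) := by unfold Spec_getXORSum; infer_instance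

-- ===== CLAIM (what is proved, stated in full; the proofs are below) =====
def Claim_equal_getXORSum : Prop := ∀ (arr1 : List Int) (arr2 : List Int), Dom_getXORSum arr1 arr2 → Spec_getXORSum arr1 arr2 (getXORSum arr1 arr2)

-- ===== LEMMAS AND PROOFS =====

theorem pv_ldiff_add_and (m : Nat) : ∀ n, Nat.ldiff m n + (m &&& n) = m := by
  induction m using Nat.binaryRec with
  | zero => intro n; simp [Nat.ldiff]
  | bit a m ih =>
    intro n
    induction n using Nat.bitCasesOn with
    | bit b n' =>
      rw [Nat.ldiff_bit, Nat.land_bit, Nat.bit_val, Nat.bit_val, Nat.bit_val]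
      have h := ih n'
      cases a <;> cases b <;> simp only [Bool.and_true, Bool.and_false, Bool.not_true,
        Bool.not_false, Bool.toNat_true, Bool.toNat_false] <;> omega

theorem pv_band_eq_land (a b : Int) : PySem.Int.band a b = Int.land a b := by
  cases a with
  | ofNat m =>
    cases b with
    | ofNat n =>
      unfold PySem.Int.band
      rw [if_pos (show (0:Int) ≤ Int.ofNat _ from Int.le.intro_sub _ rfl), if_pos (show (0:Int) ≤ Int.ofNat _ from Int.le.intro_sub _ rfl)]
      simp [Int.land]
    | negSucc n =>
      unfold PySem.Int.band
      rw [if_pos (show (0:Int) ≤ Int.ofNat _ from Int.le.intro_sub _ rfl), if_neg (by rw [Int.negSucc_eq]; omega)]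
      have h2 : (-(Int.negSucc n) - 1).toNat = n := by rw [Int.negSucc_eq]; omega
      have h3 : (Int.ofNat m).toNat = m := rfl
      rw [h2, h3]
      show ((m - (m &&& n) : Nat) : Int) = Int.land (Int.ofNat m) (Int.negSucc n)
      have hl : Int.land (Int.ofNat m) (Int.negSucc n) = ((Nat.ldiff m n : Nat) : Int) := rfl
      rw [hl]
      have := pv_ldiff_add_and m n
      omega
  | negSucc m =>
    have hm : (-(Int.negSucc m) - 1).toNat = m := by rw [Int.negSucc_eq]; omega
    cases b with
    | ofNat n =>
      unfold PySem.Int.band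
      rw [if_neg (by rw [Int.negSucc_eq]; omega), if_pos (show (0:Int) ≤ Int.ofNat _ from Int.le.intro_sub _ rfl)]
      have h3 : (Int.ofNat n).toNat = n := rfl
      rw [hm, h3]
      show ((n - (n &&& m) : Nat) : Int) = Int.land (Int.negSucc m) (Int.ofNat n)
      have hl : Int.land (Int.negSucc m) (Int.ofNat n) = ((Nat.ldiff n m : Nat) : Int) := rfl
      rw [hl]
      have := pv_ldiff_add_and n m
      omega
    | negSucc n =>
      unfold PySem.Int.band
      rw [if_neg (by rw [Int.negSucc_eq]; omega), if_neg (by rw [Int.negSucc_eq]; omega)]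
      have h2 : (-(Int.negSucc n) - 1).toNat = n := by rw [Int.negSucc_eq]; omega
      rw [hm, h2]
      have hl : Int.land (Int.negSucc m) (Int.negSucc n) = Int.negSucc (m ||| n) := rfl
      rw [hl, Int.negSucc_eq]
      omega

theorem pv_bxor_eq_xor (a b : Int) : PySem.Int.bxor a b = Int.xor a b := by
  cases a with
  | ofNat m =>
    cases b with
    | ofNat n =>
      unfold PySem.Int.bxor
      rw [if_pos (show (0:Int) ≤ Int.ofNat _ from Int.le.intro_sub _ rfl), if_pos (show (0:Int) ≤ Int.ofNat _ from Int.le.intro_sub _ rfl)]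
      rfl
    | negSucc n =>
      unfold PySem.Int.bxor
      rw [if_pos (show (0:Int) ≤ Int.ofNat _ from Int.le.intro_sub _ rfl), if_neg (by rw [Int.negSucc_eq]; omega)]
      have h2 : (-(Int.negSucc n) - 1).toNat = n := by rw [Int.negSucc_eq]; omega
      have h3 : (Int.ofNat m).toNat = m := rfl
      rw [h2, h3]
      have hl : Int.xor (Int.ofNat m) (Int.negSucc n) = Int.negSucc (m ^^^ n) := rfl
      rw [hl, Int.negSucc_eq]
      omega
  | negSucc m =>
    have hm : (-(Int.negSucc m) - 1).toNat = m := by rw [Int.negSucc_eq]; omega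
    cases b with
    | ofNat n =>
      unfold PySem.Int.bxor
      rw [if_neg (by rw [Int.negSucc_eq]; omega), if_pos (show (0:Int) ≤ Int.ofNat _ from Int.le.intro_sub _ rfl)]
      have h3 : (Int.ofNat n).toNat = n := rfl
      rw [hm, h3]
      have hl : Int.xor (Int.negSucc m) (Int.ofNat n) = Int.negSucc (m ^^^ n) := rfl
      rw [hl, Int.negSucc_eq]
      omega
    | negSucc n =>
      unfold PySem.Int.bxor
      rw [if_neg (by rw [Int.negSucc_eq]; omega), if_neg (by rw [Int.negSucc_eq]; omega)]
      have h2 : (-(Int.negSucc n) - 1).toNat = n := by rw [Int.negSucc_eq]; omega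
      rw [hm, h2]
      rfl

-- extensionality for Int via testBit
theorem pv_int_ext (m n : Int) (h : ∀ k, m.testBit k = n.testBit k) : m = n := by
  cases m with
  | ofNat a =>
    cases n with
    | ofNat b =>
      congr 1
      apply Nat.eq_of_testBit_eq
      intro k; have := h k; simpa [Int.testBit] using this
    | negSucc b =>
      exfalso
      have hk := h (a + b)
      have ha : a.testBit (a + b) = false :=
        Nat.testBit_lt_two_pow (lt_of_lt_of_le (Nat.lt_two_pow_self)
          (Nat.pow_le_pow_right (by norm_num) (Nat.le_add_right a b)))
      have hb : b.testBit (a + b) = false :=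
        Nat.testBit_lt_two_pow (lt_of_lt_of_le (Nat.lt_two_pow_self)
          (Nat.pow_le_pow_right (by norm_num) (Nat.le_add_left b a)))
      simp [Int.testBit, ha, hb] at hk
  | negSucc a =>
    cases n with
    | ofNat b =>
      exfalso
      have hk := h (a + b)
      have ha : a.testBit (a + b) = false :=
        Nat.testBit_lt_two_pow (lt_of_lt_of_le (Nat.lt_two_pow_self)
          (Nat.pow_le_pow_right (by norm_num) (Nat.le_add_right a b)))
      have hb : b.testBit (a + b) = false :=
        Nat.testBit_lt_two_pow (lt_of_lt_of_le (Nat.lt_two_pow_self)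
          (Nat.pow_le_pow_right (by norm_num) (Nat.le_add_left b a)))
      simp [Int.testBit, ha, hb] at hk
    | negSucc b =>
      congr 1
      apply Nat.eq_of_testBit_eq
      intro k; have := h k; simpa [Int.testBit] using this

theorem pv_distrib_right (a b c : Int) :
    PySem.Int.band (PySem.Int.bxor a b) c =
      PySem.Int.bxor (PySem.Int.band a c) (PySem.Int.band b c) := by
  simp only [pv_band_eq_land, pv_bxor_eq_xor]
  apply pv_int_ext
  intro k
  simp only [Int.testBit_land, Int.testBit_lxor]
  cases a.testBit k <;> cases b.testBit k <;> cases c.testBit k <;> rfl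

theorem pv_distrib_left (a b c : Int) :
    PySem.Int.band a (PySem.Int.bxor b c) =
      PySem.Int.bxor (PySem.Int.band a b) (PySem.Int.band a c) := by
  simp only [pv_band_eq_land, pv_bxor_eq_xor]
  apply pv_int_ext
  intro k
  simp only [Int.testBit_land, Int.testBit_lxor]
  cases a.testBit k <;> cases b.testBit k <;> cases c.testBit k <;> rfl

theorem pv_bxor_assoc (a b c : Int) :
    PySem.Int.bxor (PySem.Int.bxor a b) c = PySem.Int.bxor a (PySem.Int.bxor b c) := by
  simp only [pv_bxor_eq_xor]
  apply pv_int_ext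
  intro k
  simp only [Int.testBit_lxor]
  cases a.testBit k <;> cases b.testBit k <;> cases c.testBit k <;> rfl

theorem pv_zero_bxor (a : Int) : PySem.Int.bxor 0 a = a := by
  rw [PySem.Int.bxor_comm]; exact PySem.Int.bxor_zero a

theorem pv_zero_band (a : Int) : PySem.Int.band 0 a = 0 := by
  rw [PySem.Int.band_comm]; exact PySem.Int.band_zero a

-- shifting the accumulator out of an XOR fold
theorem pv_foldl_bxor_shift (l : List Int) : ∀ s : Int,
    l.foldl (fun acc a => PySem.Int.bxor acc a) s =
      PySem.Int.bxor s (l.foldl (fun acc a => PySem.Int.bxor acc a) 0) := by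
  induction l with
  | nil => intro s; simp [List.foldl, PySem.Int.bxor_zero]
  | cons y l ih =>
    intro s
    simp only [List.foldl]
    rw [ih (PySem.Int.bxor s y), ih (PySem.Int.bxor 0 y), pv_zero_bxor, pv_bxor_assoc]

-- the inner loop of B XORs x & (xor of arr2) onto the accumulator
theorem pv_inner (x : Int) (l : List Int) : ∀ s : Int,
    l.foldl (fun r y => PySem.Int.bxor r (PySem.Int.band x y)) s =
      PySem.Int.bxor s (PySem.Int.band x (l.foldl (fun acc a => PySem.Int.bxor acc a) 0)) := by
  induction l with
  | nil => intro s; simp [List.foldl, PySem.Int.band_zero, PySem.Int.bxor_zero]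
  | cons y l ih =>
    intro s
    simp only [List.foldl]
    rw [ih, pv_foldl_bxor_shift l (PySem.Int.bxor 0 y), pv_zero_bxor,
      pv_distrib_left, ← pv_bxor_assoc]

-- the outer loop of B ANDs (xor of arr1) with (xor of arr2)
theorem pv_outer (l2 : List Int) (l1 : List Int) : ∀ s : Int,
    l1.foldl (fun res x => l2.foldl (fun r y => PySem.Int.bxor r (PySem.Int.band x y)) res) s =
      PySem.Int.bxor s (PySem.Int.band (l1.foldl (fun acc a => PySem.Int.bxor acc a) 0)
        (l2.foldl (fun acc a => PySem.Int.bxor acc a) 0)) := by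
  induction l1 with
  | nil => intro s; simp [List.foldl, pv_zero_band, PySem.Int.bxor_zero]
  | cons x l1 ih =>
    intro s
    simp only [List.foldl]
    rw [pv_inner, ih, pv_foldl_bxor_shift l1 (PySem.Int.bxor 0 x), pv_zero_bxor,
      pv_distrib_right, ← pv_bxor_assoc]

-- ===== VERDICT (by name: the statement is the Claim_ definition above) =====
theorem getXORSum_spec : Claim_equal_getXORSum := by
  intro arr1 arr2 _
  unfold Spec_getXORSum getXORSum getXORSum_alt
  rw [pv_outer, pv_zero_bxor]
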